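-- pv_equiv track=rewrite | github.com/DMDTague/data-whisperer | backend/engines/insight_engine.py | _pick_column_from_question
-- ===== SOURCE A (Python) =====
-- from typing import Any, Dict, List, Optional, Tuple
--
-- def _pick_column_from_question(question: str, candidates: List[str]) -> Optional[str]:
--     """
--     If the question mentions a column name (or part of it),
--     try to use that one.
--     """
--     q = question.lower()
--     best_match = None
--     best_len = 0
--     for col in candidates:
--         name = col.lower()
--         if name in q and len(name) > best_len:
--             best_match = col
--             best_len = len(name)
--     return best_match
-- ===== SOURCE B (Python) =====
-- def _pick_column_from_question(question, candidates):
--     """Two-pass: collect lengths of matching names, take the max, then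
--     return the first candidate of that length that matches."""
--     q = question.lower()
--     lens = [len(c) for c in candidates if c and c.lower() in q]
--     if not lens:
--         return None
--     top = max(lens)
--     for c in candidates:
--         if len(c) == top and c.lower() in q:
--             return c
--     return None
-- ===== Notes on version B (the rewrite author's own statement) =====
-- stated objective: alternative
-- what changed: B replaces A's single-pass best-so-far tracking (best_match/best_len accumulators) with a two-phase decomposition: first collect the lengths of all matching candidate names and take their max, then early-return the first candidate of exactly that length that matches.
import Mathlib
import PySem

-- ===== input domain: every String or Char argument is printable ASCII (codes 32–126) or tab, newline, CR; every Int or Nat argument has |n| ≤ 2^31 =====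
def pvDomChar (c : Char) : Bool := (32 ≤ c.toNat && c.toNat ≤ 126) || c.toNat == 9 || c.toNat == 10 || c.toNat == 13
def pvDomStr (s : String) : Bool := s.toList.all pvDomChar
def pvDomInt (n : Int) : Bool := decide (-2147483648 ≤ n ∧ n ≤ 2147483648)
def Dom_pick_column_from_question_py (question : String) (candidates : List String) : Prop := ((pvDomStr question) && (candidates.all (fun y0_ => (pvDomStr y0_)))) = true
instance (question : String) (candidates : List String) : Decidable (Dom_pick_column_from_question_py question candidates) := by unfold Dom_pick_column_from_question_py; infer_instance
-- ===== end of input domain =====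

-- B replaces A's single-pass best-so-far scan by a two-phase decomposition (max of matching lengths, then first candidate of that length): an alternative of the same cost.
-- ===== PORT A =====
-- loop 'for col in candidates' tracking (best_match, best_len), transliterated as structural recursion
def pickA_loop (q : String) : List String → Option String → Int → Option String
  | [], best, _ => best
  | col :: rest, best, bestLen =>
    let name := PySem.Str.lower col
    if PySem.Str.isIn name q && decide (bestLen < PySem.Str.len name) then
      pickA_loop q rest (some col) (PySem.Str.len name)
    else
      pickA_loop q rest best bestLen

def pick_column_from_question_py (question : String) (candidates : List String) : Option String :=
  pickA_loop (PySem.Str.lower question) candidates none 0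

-- ===== PORT B =====
-- B: lens = [len(c) for c in candidates if c and c.lower() in q]; top = max(lens); first c with len(c)==top and c.lower() in q
def pick_column_from_question_py_alt (question : String) (candidates : List String) : Option String :=
  let q := PySem.Str.lower question
  let lens := (candidates.filter (fun c => !(c == "") && PySem.Str.isIn (PySem.Str.lower c) q)).map
      (fun c => PySem.Str.len c)
  match PySem.List.max? lens (fun x => x) with
  | none => none
  | some top =>
      candidates.find? (fun c => decide (PySem.Str.len c = top) && PySem.Str.isIn (PySem.Str.lower c) q)

-- ===== PRECONDITION & SPEC =====
def Spec_pick_column_from_question_py (question : String) (candidates : List String) (out : Option String) : Prop := out = pick_column_from_question_py_alt question candidates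
instance (question : String) (candidates : List String) (out : Option String) : Decidable (Spec_pick_column_from_question_py question candidates out) := by unfold Spec_pick_column_from_question_py; infer_instance

-- ===== CLAIM (what is proved, stated in full; the proofs are below) =====
def Claim_equal_pick_column_from_question_py : Prop := ∀ (question : String) (candidates : List String), Dom_pick_column_from_question_py question candidates → Spec_pick_column_from_question_py question candidates (pick_column_from_question_py question candidates)

-- ===== LEMMAS AND PROOFS =====

theorem len_lower (s : String) : PySem.Str.len (PySem.Str.lower s) = PySem.Str.len s := by
  simp [PySem.Str.len, PySem.Str.toList_lower, PySem.Chars.lower]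

-- max of the lengths of matching candidates strictly above a threshold L, as a recursion mirroring A's loop
def mxT (q : String) : List String → Int → Option Int
  | [], _ => none
  | c :: cs, L =>
    if PySem.Str.isIn (PySem.Str.lower c) q && decide (L < PySem.Str.len c) then
      some ((mxT q cs (PySem.Str.len c)).getD (PySem.Str.len c))
    else
      mxT q cs L

theorem mxT_gt (q : String) (cs : List String) : ∀ (L M : Int), mxT q cs L = some M → L < M := by
  induction cs with
  | nil => intro L M h; simp [mxT] at h
  | cons c cs ih =>
    intro L M h
    simp only [mxT] at h
    split at h
    · rename_i hc
      simp only [Bool.and_eq_true, decide_eq_true_eq] at hc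
      cases hM : mxT q cs (PySem.Str.len c) with
      | none => rw [hM] at h; simp only [Option.getD_none, Option.some.injEq] at h; omega
      | some M' =>
        have := ih _ _ hM
        rw [hM] at h; simp only [Option.getD_some, Option.some.injEq] at h; omega
    · exact ih _ _ h

theorem loopA_eq (q : String) (cs : List String) : ∀ (L : Int) (b : Option String),
    pickA_loop q cs b L =
      match mxT q cs L with
      | none => b
      | some M => cs.find? (fun c => decide (PySem.Str.len c = M) && PySem.Str.isIn (PySem.Str.lower c) q) := by
  induction cs with
  | nil => intro L b; simp [pickA_loop, mxT]
  | cons c cs ih =>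
    intro L b
    by_cases hc : (PySem.Str.isIn (PySem.Str.lower c) q && decide (L < PySem.Str.len c)) = true
    · have hm : PySem.Str.isIn (PySem.Str.lower c) q = true := by
        simp only [Bool.and_eq_true] at hc; exact hc.1
      have hL : L < PySem.Str.len c := by
        simp only [Bool.and_eq_true, decide_eq_true_eq] at hc; exact hc.2
      have hstep : pickA_loop q (c :: cs) b L = pickA_loop q cs (some c) (PySem.Str.len c) := by
        simp only [pickA_loop, len_lower, hm, hL, decide_true, Bool.and_self, if_true]
      have hmx : mxT q (c :: cs) L = some ((mxT q cs (PySem.Str.len c)).getD (PySem.Str.len c)) := by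
        simp only [mxT, hm, hL, decide_true, Bool.and_self, if_true]
      rw [hstep, ih, hmx]
      cases hM : mxT q cs (PySem.Str.len c) with
      | none =>
        simp only [Option.getD_none, List.find?_cons, hm, decide_true, Bool.and_self]
      | some M' =>
        have hlt := mxT_gt q cs _ _ hM
        simp only [Option.getD_some, List.find?_cons]
        split
        · rename_i hx
          exfalso
          simp only [Bool.and_eq_true, decide_eq_true_eq] at hx
          omega
        · rfl
    · simp only [Bool.not_eq_true] at hc
      have hstep : pickA_loop q (c :: cs) b L = pickA_loop q cs b L := by
        simp only [pickA_loop, len_lower, hc, Bool.false_eq_true, if_false]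
      have hmx : mxT q (c :: cs) L = mxT q cs L := by
        simp only [mxT, hc, Bool.false_eq_true, if_false]
      rw [hstep, ih, hmx]
      cases hM : mxT q cs L with
      | none => rfl
      | some M =>
        have hlt := mxT_gt q cs _ _ hM
        simp only [List.find?_cons]
        split
        · rename_i hx
          exfalso
          simp only [Bool.and_eq_true, decide_eq_true_eq] at hx
          cases hmm : PySem.Str.isIn (PySem.Str.lower c) q with
          | false => rw [hmm] at hx; exact Bool.false_ne_true hx.2
          | true =>
            have hnl : decide (L < PySem.Str.len c) = false := by
              cases hdd : decide (L < PySem.Str.len c)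
              · rfl
              · rw [hmm, hdd] at hc; simp at hc
            simp only [decide_eq_false_iff_not] at hnl
            omega
        · rfl

-- unique characterisation of max? with the identity key on Int lists
theorem max?_id_of_ub (xs : List Int) (M : Int) (hmem : M ∈ xs) (hub : ∀ y ∈ xs, y ≤ M) :
    PySem.List.max? xs (fun x => x) = some M := by
  cases hmx : PySem.List.max? xs (fun x => x) with
  | none =>
    rw [PySem.List.max?_eq_none_iff] at hmx
    subst hmx; simp at hmem
  | some M' =>
    have h1 : M' ∈ xs := PySem.List.max?_mem hmx
    have h2 : ∀ y ∈ xs, y ≤ M' := PySem.List.max?_isMax hmx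
    have := hub M' h1
    have := h2 M hmem
    congr 1; omega

theorem len_pos_iff (c : String) : (!(c == "")) = decide (0 < PySem.Str.len c) := by
  simp only [PySem.Str.len]
  by_cases hce : c = ""
  · subst hce; simp
  · have htl : c.toList ≠ [] := by
      intro h
      apply hce
      have h2 := congrArg String.ofList h
      simpa using h2
    have hlen : 0 < c.toList.length := List.length_pos_iff.mpr htl
    have h2 : (0 : Int) < ↑c.toList.length := by exact_mod_cast hlen
    have hb : (c == "") = false := beq_eq_false_iff_ne.mpr hce
    rw [hb]
    simp only [Bool.not_false]
    symm
    exact decide_eq_true h2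

theorem mxT_eq_max? (q : String) (cs : List String) : ∀ (L : Int),
    mxT q cs L =
      PySem.List.max? ((cs.filter (fun c => PySem.Str.isIn (PySem.Str.lower c) q && decide (L < PySem.Str.len c))).map
        (fun c => PySem.Str.len c)) (fun x => x) := by
  induction cs with
  | nil =>
    intro L
    simp only [mxT, List.filter_nil, List.map_nil]
    exact ((PySem.List.max?_eq_none_iff [] (fun x => x)).mpr rfl).symm
  | cons c cs ih =>
    intro L
    by_cases hc : (PySem.Str.isIn (PySem.Str.lower c) q && decide (L < PySem.Str.len c)) = true
    · have hm : PySem.Str.isIn (PySem.Str.lower c) q = true := by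
        simp only [Bool.and_eq_true] at hc; exact hc.1
      have hL : L < PySem.Str.len c := by
        simp only [Bool.and_eq_true, decide_eq_true_eq] at hc; exact hc.2
      have hfl : (c :: cs).filter (fun c => PySem.Str.isIn (PySem.Str.lower c) q && decide (L < PySem.Str.len c))
          = c :: cs.filter (fun c => PySem.Str.isIn (PySem.Str.lower c) q && decide (L < PySem.Str.len c)) := by
        rw [List.filter_cons, if_pos hc]
      rw [hfl]
      have hmx : mxT q (c :: cs) L = some ((mxT q cs (PySem.Str.len c)).getD (PySem.Str.len c)) := by
        simp only [mxT, hc, if_true]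
      rw [hmx]
      cases hM : mxT q cs (PySem.Str.len c) with
      | none =>
        -- no matching element in cs has length > len c: head is the max
        have hnone : cs.filter (fun d => PySem.Str.isIn (PySem.Str.lower d) q && decide (PySem.Str.len c < PySem.Str.len d)) = [] := by
          have hthis := ih (PySem.Str.len c)
          rw [hM] at hthis
          have h2 := (PySem.List.max?_eq_none_iff ((cs.filter (fun d => PySem.Str.isIn (PySem.Str.lower d) q && decide (PySem.Str.len c < PySem.Str.len d))).map (fun d => PySem.Str.len d)) (fun x => x)).mp hthis.symm
          exact List.map_eq_nil_iff.mp h2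
        have hub : ∀ y ∈ (PySem.Str.len c) :: (cs.filter (fun d => PySem.Str.isIn (PySem.Str.lower d) q && decide (L < PySem.Str.len d))).map (fun d => PySem.Str.len d), y ≤ PySem.Str.len c := by
          intro y hy
          rcases List.mem_cons.mp hy with h | h
          · omega
          · rcases List.mem_map.mp h with ⟨d, hd, rfl⟩
            have hdm := List.mem_filter.mp hd
            by_contra hgt
            push Not at hgt
            have : d ∈ cs.filter (fun d => PySem.Str.isIn (PySem.Str.lower d) q && decide (PySem.Str.len c < PySem.Str.len d)) := by
              refine List.mem_filter.mpr ⟨hdm.1, ?_⟩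
              have := hdm.2
              simp only [Bool.and_eq_true, decide_eq_true_eq] at this ⊢
              exact ⟨this.1, hgt⟩
            rw [hnone] at this
            simp at this
        rw [List.map_cons]
        simp only [Option.getD_none]
        exact (max?_id_of_ub _ _ (List.mem_cons_self) hub).symm
      | some M' =>
        have hMgt := mxT_gt q cs _ _ hM
        have hih := ih (PySem.Str.len c)
        rw [hM] at hih
        have hmem := PySem.List.max?_mem hih.symm
        have hubs := PySem.List.max?_isMax hih.symm
        rcases List.mem_map.mp hmem with ⟨d, hd, hdM⟩
        have hdf := List.mem_filter.mp hd
        have hdcond := hdf.2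
        simp only [Bool.and_eq_true, decide_eq_true_eq] at hdcond
        have hdL : d ∈ cs.filter (fun d => PySem.Str.isIn (PySem.Str.lower d) q && decide (L < PySem.Str.len d)) := by
          refine List.mem_filter.mpr ⟨hdf.1, ?_⟩
          simp only [Bool.and_eq_true, decide_eq_true_eq]
          exact ⟨hdcond.1, by omega⟩
        have hub : ∀ y ∈ (PySem.Str.len c) :: (cs.filter (fun e => PySem.Str.isIn (PySem.Str.lower e) q && decide (L < PySem.Str.len e))).map (fun e => PySem.Str.len e), y ≤ M' := by
          intro y hy
          rcases List.mem_cons.mp hy with h | h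
          · omega
          · rcases List.mem_map.mp h with ⟨e, he, rfl⟩
            have hef := List.mem_filter.mp he
            have hecond := hef.2
            simp only [Bool.and_eq_true, decide_eq_true_eq] at hecond
            by_cases hlen : PySem.Str.len c < PySem.Str.len e
            · have : e ∈ cs.filter (fun d => PySem.Str.isIn (PySem.Str.lower d) q && decide (PySem.Str.len c < PySem.Str.len d)) := by
                refine List.mem_filter.mpr ⟨hef.1, ?_⟩
                simp only [Bool.and_eq_true, decide_eq_true_eq]
                exact ⟨hecond.1, hlen⟩
              have := hubs _ (List.mem_map.mpr ⟨e, this, rfl⟩)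
              simpa using this
            · omega
        have hmemL : M' ∈ (PySem.Str.len c) :: (cs.filter (fun e => PySem.Str.isIn (PySem.Str.lower e) q && decide (L < PySem.Str.len e))).map (fun e => PySem.Str.len e) :=
          List.mem_cons.mpr (Or.inr (List.mem_map.mpr ⟨d, hdL, hdM⟩))
        rw [List.map_cons]
        simp only [Option.getD_some]
        exact (max?_id_of_ub _ _ hmemL hub).symm
    · simp only [Bool.not_eq_true] at hc
      have hfl : (c :: cs).filter (fun c => PySem.Str.isIn (PySem.Str.lower c) q && decide (L < PySem.Str.len c))
          = cs.filter (fun c => PySem.Str.isIn (PySem.Str.lower c) q && decide (L < PySem.Str.len c)) := by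
        simp only [List.filter_cons, hc, Bool.false_eq_true, if_false]
      have hmx : mxT q (c :: cs) L = mxT q cs L := by
        simp only [mxT, hc, Bool.false_eq_true, if_false]
      rw [hfl, hmx, ih]

-- ===== VERDICT (by name: the statement is the Claim_ definition above) =====
theorem pick_column_from_question_py_spec : Claim_equal_pick_column_from_question_py := by
  intro question candidates _
  unfold Spec_pick_column_from_question_py
  unfold pick_column_from_question_py pick_column_from_question_py_alt
  rw [loopA_eq]
  have hfilt : candidates.filter (fun c => !(c == "") && PySem.Str.isIn (PySem.Str.lower c) (PySem.Str.lower question))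
      = candidates.filter (fun c => PySem.Str.isIn (PySem.Str.lower c) (PySem.Str.lower question) && decide ((0 : Int) < PySem.Str.len c)) := by
    apply List.filter_congr
    intro c _
    rw [len_pos_iff]
    exact Bool.and_comm _ _
  simp only [hfilt, ← mxT_eq_max?]
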